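-- pv_equiv track=rewrite | github.com/Oli51467/gobot-mobile | view/src/main/python/Support.py | I2B
-- ===== SOURCE A (Python) =====
-- def I2B(value, N):
--     # 指定list的长度
--     array = [' '] * N
--     for i in range(0, N):
--         if value > 0:
--             array[i] = value % 2
--             # python中的整除，向下取整
--             value = value // 2
--         else:
--             array[i] = 0
--     return array
-- ===== SOURCE B (Python) =====
-- def I2B(value, N):
--     if value <= 0 or N <= 0:
--         return [0] * N          # [] when N <= 0
--     s = bin(value)[2:][::-1]    # little-endian binary digit string
--     return [int(c) for c in s[:N].ljust(N, '0')]
-- ===== Notes on version B (the rewrite author's own statement) =====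
-- stated objective: alternative
-- what changed: B converts the number once to a binary digit string (bin(value)), reverses it, truncates/pads it to length N with string operations, and maps characters to ints -- instead of A's loop that mutates a preallocated array while threading a running floor-divided value.
import Mathlib
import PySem

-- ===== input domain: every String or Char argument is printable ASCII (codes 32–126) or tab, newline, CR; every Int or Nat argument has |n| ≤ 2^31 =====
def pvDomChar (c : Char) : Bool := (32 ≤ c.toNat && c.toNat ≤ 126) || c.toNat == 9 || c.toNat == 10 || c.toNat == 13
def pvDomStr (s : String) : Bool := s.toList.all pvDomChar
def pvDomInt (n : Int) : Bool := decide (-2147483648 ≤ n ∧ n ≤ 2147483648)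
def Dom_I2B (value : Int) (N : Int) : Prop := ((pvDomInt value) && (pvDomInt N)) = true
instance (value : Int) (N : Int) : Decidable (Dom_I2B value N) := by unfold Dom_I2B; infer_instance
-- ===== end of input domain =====

-- B builds the whole binary digit string once (bin-style), then reverses/truncates/pads it and
-- maps characters to ints, instead of A's array-mutating loop over a running quotient; same cost.

-- ===== PORT A =====
-- Python's `[' '] * N` placeholder is ported as `List.replicate N.toNat 0`: every slot is
-- overwritten by the loop (range(0, N) covers all N indices), so the placeholder never escapes.
def I2B (value : Int) (N : Int) : List Int :=
  let array : List Int := List.replicate N.toNat 0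
  let st := (PySem.List.pyRange 0 N 1).foldl
    (fun (s : List Int × Int) (i : Int) =>
      if s.2 > 0 then
        (s.1.set i.toNat (PySem.Int.mod s.2 2), PySem.Int.floordiv s.2 2)
      else
        (s.1.set i.toNat 0, s.2))
    (array, value)
  st.1

-- ===== PORT B =====
-- hand port of Python's bin(n)[2:] for n ≥ 0: MSB-first binary digit characters (exact)
def pvBinChars (n : Nat) : List Char :=
  if h : n < 2 then [Char.ofNat (48 + n)]
  else pvBinChars (n / 2) ++ [Char.ofNat (48 + n % 2)]
termination_by n
decreasing_by exact Nat.div_lt_self (by omega) (by omega)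

-- int(c) for a single digit character (exact on '0'..'9')
def pvDigit (c : Char) : Int := (c.toNat : Int) - 48

-- strings are ported as List Char; [::-1] = reverse, s[:N] = take (N > 0 in this branch),
-- ljust(N,'0') = append '0'-padding up to length N
def I2B_alt (value : Int) (N : Int) : List Int :=
  if value ≤ 0 ∨ N ≤ 0 then
    List.replicate N.toNat 0
  else
    let s := (pvBinChars value.toNat).reverse
    let t := s.take N.toNat
    (t ++ List.replicate (N.toNat - t.length) '0').map pvDigit

-- ===== PRECONDITION & SPEC =====
def Spec_I2B (value : Int) (N : Int) (out : List Int) : Prop := out = I2B_alt value N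
instance (value : Int) (N : Int) (out : List Int) : Decidable (Spec_I2B value N out) := by unfold Spec_I2B; infer_instance

-- ===== CLAIM (what is proved, stated in full; the proofs are below) =====
def Claim_equal_I2B : Prop := ∀ (value : Int) (N : Int), Dom_I2B value N → Spec_I2B value N (I2B value N)

-- ===== LEMMAS AND PROOFS =====

-- common reference: the little-endian bit list both ports compute
def pvBits (v : Int) (n : Nat) : List Int :=
  match n with
  | 0 => []
  | n + 1 =>
    if v > 0 then PySem.Int.mod v 2 :: pvBits (PySem.Int.floordiv v 2) n
    else 0 :: pvBits v n

theorem pvBits_nonpos (v : Int) (n : Nat) (hv : ¬ v > 0) :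
    pvBits v n = List.replicate n 0 := by
  induction n with
  | zero => rfl
  | succ n ih => simp [pvBits, hv, ih, List.replicate]

theorem pvSet_at_len (done : List Int) (x y : Int) (rest : List Int) :
    (done ++ y :: rest).set done.length x = done ++ x :: rest := by
  induction done with
  | nil => rfl
  | cons a t ih => simp [ih]

theorem pvFoldA (n : Nat) : ∀ (k : Nat) (done : List Int) (v : Int), done.length = k →
    ((List.range' k n).foldl
      (fun (s : List Int × Int) (i : Nat) =>
        if s.2 > 0 then
          (s.1.set i (PySem.Int.mod s.2 2), PySem.Int.floordiv s.2 2)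
        else
          (s.1.set i 0, s.2))
      (done ++ List.replicate n 0, v)).1 = done ++ pvBits v n := by
  induction n with
  | zero => intro k done v hk; simp [pvBits]
  | succ n ih =>
    intro k done v hk
    rw [List.range'_succ]
    simp only [List.foldl_cons]
    by_cases hv : v > 0
    · have hset : (done ++ List.replicate (n + 1) 0).set k (PySem.Int.mod v 2)
          = (done ++ [PySem.Int.mod v 2]) ++ List.replicate n 0 := by
        subst hk
        rw [List.replicate_succ, pvSet_at_len]
        simp
      simp only [hv, if_pos, hset]
      have := ih (k + 1) (done ++ [PySem.Int.mod v 2]) (PySem.Int.floordiv v 2)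
        (by simp [← hk])
      rw [this]
      simp [pvBits, hv]
    · have hset : (done ++ List.replicate (n + 1) 0).set k (0 : Int)
          = (done ++ [(0 : Int)]) ++ List.replicate n 0 := by
        subst hk
        rw [List.replicate_succ, pvSet_at_len]
        simp
      simp only [hv, if_false, hset]
      have := ih (k + 1) (done ++ [(0 : Int)]) v (by simp [← hk])
      rw [this]
      simp [pvBits, hv]

theorem pvRange_cast (N : Int) :
    PySem.List.pyRange 0 N 1 = (List.range N.toNat).map (fun (k : Nat) => (k : Int)) := by
  rw [PySem.List.pyRange_one]
  simp

theorem pvA_eq_bits (value N : Int) : I2B value N = pvBits value N.toNat := by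
  unfold I2B
  simp only [pvRange_cast, List.foldl_map, Int.toNat_natCast, List.range_eq_range']
  simpa using pvFoldA N.toNat 0 [] value rfl

theorem pvBinChars_lt (n : Nat) (h : n < 2) : pvBinChars n = [Char.ofNat (48 + n)] := by
  rw [pvBinChars]; simp [h]

theorem pvBinChars_ge (n : Nat) (h : ¬ n < 2) :
    pvBinChars n = pvBinChars (n / 2) ++ [Char.ofNat (48 + n % 2)] := by
  rw [pvBinChars]; simp [h]

theorem pvDigit_digit (r : Nat) (hr : r < 2) : pvDigit (Char.ofNat (48 + r)) = (r : Int) := by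
  interval_cases r <;> decide

theorem pvKey (n : Nat) (hn : 0 < n) : ∀ N : Nat,
    (((pvBinChars n).reverse.take N ++
      List.replicate (N - ((pvBinChars n).reverse.take N).length) '0').map pvDigit)
      = pvBits (n : Int) N := by
  induction n using Nat.strong_induction_on with
  | _ n ih =>
    intro N
    cases N with
    | zero => simp [pvBits]
    | succ M =>
      by_cases h2 : n < 2
      · have hn1 : n = 1 := by omega
        subst hn1
        rw [pvBinChars_lt 1 (by omega)]
        push_cast
        have hb : pvBits (1 : Int) (M + 1) = 1 :: List.replicate M 0 := by
          simp only [pvBits]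
          rw [if_pos (by omega : (1:Int) > 0)]
          rw [(by decide : PySem.Int.mod 1 2 = 1), (by decide : PySem.Int.floordiv 1 2 = 0)]
          rw [pvBits_nonpos 0 M (by omega)]
        rw [hb]
        simp only [List.reverse_singleton, List.take_succ_cons, List.take_nil,
          List.length_cons, List.length_nil, List.map_cons, List.map_append,
          List.map_replicate]
        rw [(by decide : pvDigit (Char.ofNat (48 + 1)) = 1),
          (by decide : pvDigit '0' = 0)]
        simp
      · rw [pvBinChars_ge n h2]
        simp only [List.reverse_append, List.reverse_singleton, List.singleton_append,
          List.take_succ_cons, List.length_cons, List.map_cons]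
        have hrec := ih (n / 2) (Nat.div_lt_self (by omega) (by omega)) (by omega) M
        simp only [List.cons_append, List.map_cons]
        have hlen : M + 1 - (((pvBinChars (n / 2)).reverse.take M).length + 1)
            = M - ((pvBinChars (n / 2)).reverse.take M).length := by omega
        rw [hlen, hrec]
        have hpos : (0 : Int) < (n : Int) := by exact_mod_cast hn
        have hmod : PySem.Int.mod (n : Int) 2 = ((n % 2 : Nat) : Int) := by
          exact_mod_cast PySem.Int.mod_natCast n 2
        have hdiv : PySem.Int.floordiv (n : Int) 2 = ((n / 2 : Nat) : Int) := by
          exact_mod_cast PySem.Int.floordiv_natCast n 2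
        have hb : pvBits (n : Int) (M + 1)
            = ((n % 2 : Nat) : Int) :: pvBits ((n / 2 : Nat) : Int) M := by
          simp only [pvBits]
          rw [if_pos (by exact_mod_cast hn : ((n:Int) > 0)), hmod, hdiv]
        rw [hb, pvDigit_digit (n % 2) (Nat.mod_lt n (by omega))]

theorem pvB_eq_bits (value N : Int) : I2B_alt value N = pvBits value N.toNat := by
  unfold I2B_alt
  by_cases h : value ≤ 0 ∨ N ≤ 0
  · rw [if_pos h]
    rcases h with hv | hN
    · rw [pvBits_nonpos value N.toNat (by omega)]
    · have : N.toNat = 0 := by omega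
      rw [this]; rfl
  · rw [if_neg h]
    push Not at h
    obtain ⟨hv, hN⟩ := h
    have hvn : 0 < value.toNat := by omega
    have := pvKey value.toNat hvn N.toNat
    rw [Int.toNat_of_nonneg (by omega)] at this
    exact this

-- ===== VERDICT (by name: the statement is the Claim_ definition above) =====
theorem I2B_spec : Claim_equal_I2B := by
  intro value N _
  unfold Spec_I2B
  rw [pvA_eq_bits, pvB_eq_bits]
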